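-- pv_equiv track=rewrite | github.com/evantilu/Guitar-tab-retriever | guitar_transcriber/harmonics_detector.py | _find_harmonic_match
-- ===== SOURCE A (Python) =====
-- from typing import Optional
--
-- HARMONIC_INTERVALS = [
--     (12, [12]),       # 2nd harmonic: octave
--     (19, [7, 19]),    # 3rd harmonic: octave + P5
--     (24, [5]),        # 4th harmonic: 2 octaves
--     (28, [4, 9]),     # 5th harmonic: 2 octaves + M3
--     (31, [3]),        # 6th harmonic: 2 octaves + P5
-- ]
--
-- def _find_harmonic_match(
--     midi_pitch: int,
--     tuning: list[int],
-- ) -> Optional[tuple[int, int, int]]: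
--     """
--     檢查一個 MIDI 音高是否可以由某條弦的自然泛音產生。
--
--     Args:
--         midi_pitch: 偵測到的 MIDI 音高
--         tuning: 吉他調弦
--
--     Returns:
--         (string_index, harmonic_fret, semitones_above_open) 或 None
--         若有多個匹配，優先選擇低弦（厚弦泛音較常用）
--     """
--     matches = []
--
--     for string_idx, open_pitch in enumerate(tuning):
--         interval = midi_pitch - open_pitch
--         for semitones, fret_positions in HARMONIC_INTERVALS:
--             if interval == semitones:
--                 # 優先選最常用的格位（12 > 7 > 5 > ...）
--                 preferred_fret = fret_positions[0]
--                 matches.append((string_idx, preferred_fret, semitones))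
--
--     if not matches:
--         return None
--
--     # 優先低弦（string_idx 小的 = 低音弦），更常用於泛音
--     # 但也考慮常見泛音格位的優先度
--     FRET_PRIORITY = {12: 0, 7: 1, 5: 2, 19: 3, 4: 4, 9: 5, 3: 6}
--     matches.sort(key=lambda m: (FRET_PRIORITY.get(m[1], 99), m[0]))
--
--     return matches[0]
-- ===== SOURCE B (Python) =====
-- from typing import Optional
--
-- # semitones -> (preferred_fret, fret_priority); priorities follow 12 > 7 > 5 > 4 > 3
-- _HARMONIC_TABLE = {12: (12, 0), 19: (7, 1), 24: (5, 2), 28: (4, 4), 31: (3, 6)}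
--
-- def _find_harmonic_match(
--     midi_pitch: int,
--     tuning: list[int],
-- ) -> Optional[tuple[int, int, int]]:
--     best = None  # (priority, string_idx, preferred_fret, semitones)
--     for string_idx, open_pitch in enumerate(tuning):
--         interval = midi_pitch - open_pitch
--         entry = _HARMONIC_TABLE.get(interval)
--         if entry is None:
--             continue
--         preferred_fret, priority = entry
--         if best is None or (priority, string_idx) < (best[0], best[1]):
--             best = (priority, string_idx, preferred_fret, interval)
--     if best is None:
--         return None
--     return (best[1], best[2], best[3])
-- ===== Notes on version B (the rewrite author's own statement) =====
-- stated objective: simpler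
-- what changed: A table keyed by the interval replaces the HARMONIC_INTERVALS scan and the FRET_PRIORITY dict, and a single running best candidate replaces building a matches list and sorting it.
import Mathlib
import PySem

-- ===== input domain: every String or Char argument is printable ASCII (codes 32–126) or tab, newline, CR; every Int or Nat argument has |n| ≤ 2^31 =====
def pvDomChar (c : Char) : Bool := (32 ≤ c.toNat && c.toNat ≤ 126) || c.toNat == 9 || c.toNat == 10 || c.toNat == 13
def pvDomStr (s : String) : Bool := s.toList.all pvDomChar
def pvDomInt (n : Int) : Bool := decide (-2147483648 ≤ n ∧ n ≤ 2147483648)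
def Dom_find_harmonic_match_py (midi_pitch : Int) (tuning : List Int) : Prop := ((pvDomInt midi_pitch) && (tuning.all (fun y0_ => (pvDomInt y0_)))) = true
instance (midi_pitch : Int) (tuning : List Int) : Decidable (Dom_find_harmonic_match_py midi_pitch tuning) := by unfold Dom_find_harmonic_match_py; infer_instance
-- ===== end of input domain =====

-- B replaces the HARMONIC_INTERVALS scan + matches list + sort by a single interval-keyed
-- table lookup and one running best candidate (simpler, one pass, no sort).


-- ===== PORT A =====
def harmonicIntervals : List (Int × List Int) :=
  [(12, [12]), (19, [7, 19]), (24, [5]), (28, [4, 9]), (31, [3])]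

def fretPriority : PySem.Dict Int Int :=
  PySem.Dict.ofList [(12, 0), (7, 1), (5, 2), (19, 3), (4, 4), (9, 5), (3, 6)]

def find_harmonic_match_py (midi_pitch : Int) (tuning : List Int) : Option (Int × Int × Int) :=
  let ms : List (Int × Int × Int) :=
    (PySem.List.enumerate tuning).foldl
      (fun ms si =>
        harmonicIntervals.foldl
          (fun ms2 hi =>
            if midi_pitch - si.2 = hi.1 then
              ms2 ++ [(si.1, PySem.List.pyGetD hi.2 0 0, hi.1)]
            else ms2)
          ms)
      []
  if ms = [] then none
  else
    (PySem.List.sorted2 ms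
      (fun m => PySem.Dict.getD fretPriority m.2.1 99)
      (fun m => m.1)).head?

-- ===== PORT B =====
def harmonicTable : PySem.Dict Int (Int × Int) :=
  PySem.Dict.ofList [(12, (12, 0)), (19, (7, 1)), (24, (5, 2)), (28, (4, 4)), (31, (3, 6))]

def find_harmonic_match_py_alt (midi_pitch : Int) (tuning : List Int) : Option (Int × Int × Int) :=
  let best : Option (Int × Int × Int × Int) :=
    (PySem.List.enumerate tuning).foldl
      (fun best si =>
        match PySem.Dict.get? harmonicTable (midi_pitch - si.2) with
        | none => best
        | some fp =>
          match best with
          | none => some (fp.2, si.1, fp.1, midi_pitch - si.2)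
          | some b =>
            if fp.2 < b.1 ∨ (fp.2 = b.1 ∧ si.1 < b.2.1) then
              some (fp.2, si.1, fp.1, midi_pitch - si.2)
            else some b)
      none
  match best with
  | none => none
  | some b => some (b.2.1, b.2.2.1, b.2.2.2)

-- ===== PRECONDITION & SPEC =====
def Spec_find_harmonic_match_py (midi_pitch : Int) (tuning : List Int) (out : Option (Int × Int × Int)) : Prop := out = find_harmonic_match_py_alt midi_pitch tuning
instance (midi_pitch : Int) (tuning : List Int) (out : Option (Int × Int × Int)) : Decidable (Spec_find_harmonic_match_py midi_pitch tuning out) := by unfold Spec_find_harmonic_match_py; infer_instance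

-- ===== CLAIM (what is proved, stated in full; the proofs are below) =====
def Claim_equal_find_harmonic_match_py : Prop := ∀ (midi_pitch : Int) (tuning : List Int), Dom_find_harmonic_match_py midi_pitch tuning → Spec_find_harmonic_match_py midi_pitch tuning (find_harmonic_match_py midi_pitch tuning)

-- ===== LEMMAS AND PROOFS =====

-- priority key A sorts by
def prioOf (c : Int × Int × Int) : Int := PySem.Dict.getD fretPriority c.2.1 99

-- the boolean comparison sorted2 uses with A's two keys
def beforeA (a b : Int × Int × Int) : Bool :=
  decide (prioOf a < prioOf b) || (!decide (prioOf b < prioOf a) && decide (a.1 < b.1))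

-- one step of a running first-minimum under a strict "before" test
def minStep {α : Type} (before : α → α → Bool) (h : Option α) (x : α) : Option α :=
  match h with
  | none => some x
  | some y => some (if before x y then x else y)

-- running first-minimum over candidates, the shape head?_foldl_insertBy produces
def aMin (ms : List (Int × Int × Int)) : Option (Int × Int × Int) :=
  ms.foldl (minStep beforeA) none

-- A's outer loop after the inner constant scan is collapsed to a table lookup
def aLoop (midi_pitch : Int) (t : List Int) (s : Int) (ms : List (Int × Int × Int)) : List (Int × Int × Int) :=
  (PySem.List.enumerate t s).foldl
    (fun ms si =>
      match PySem.Dict.get? harmonicTable (midi_pitch - si.2) with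
      | some fp => ms ++ [(si.1, fp.1, midi_pitch - si.2)]
      | none => ms)
    ms

def bLoop (midi_pitch : Int) (t : List Int) (s : Int) (best : Option (Int × Int × Int × Int)) : Option (Int × Int × Int × Int) :=
  (PySem.List.enumerate t s).foldl
    (fun best si =>
      match PySem.Dict.get? harmonicTable (midi_pitch - si.2) with
      | none => best
      | some fp =>
        match best with
        | none => some (fp.2, si.1, fp.1, midi_pitch - si.2)
        | some b =>
          if fp.2 < b.1 ∨ (fp.2 = b.1 ∧ si.1 < b.2.1) then
            some (fp.2, si.1, fp.1, midi_pitch - si.2)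
          else some b)
    best

def gCand (c : Int × Int × Int) : Int × Int × Int × Int := (prioOf c, c)

theorem head?_insertBy {α : Type} (before : α → α → Bool) (x : α) (ys : List α) :
    (PySem.List.insertBy before x ys).head? =
      some (match ys with | [] => x | y :: _ => if before x y then x else y) := by
  cases ys
  · simp [PySem.List.insertBy]
  · simp only [PySem.List.insertBy]
    split <;> simp

theorem head?_foldl_insertBy {α : Type} (before : α → α → Bool) (xs : List α) (acc : List α) :
    (xs.foldl (fun acc x => PySem.List.insertBy before x acc) acc).head? =
      xs.foldl (minStep before) acc.head? := by
  induction xs generalizing acc with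
  | nil => simp
  | cons x xs ih =>
    simp only [List.foldl_cons]
    rw [ih]
    congr 1
    rw [head?_insertBy]
    cases acc <;> rfl

theorem head?_sorted2 (ms : List (Int × Int × Int)) :
    (PySem.List.sorted2 ms (fun m => PySem.Dict.getD fretPriority m.2.1 99) (fun m => m.1)).head? =
      aMin ms := by
  rw [show PySem.List.sorted2 ms (fun m => PySem.Dict.getD fretPriority m.2.1 99) (fun m => m.1)
        = ms.foldl (fun acc x => PySem.List.insertBy beforeA x acc) [] from rfl]
  rw [head?_foldl_insertBy beforeA ms []]
  rfl

theorem table_none (d : Int) (h1 : ¬ d = 12) (h2 : ¬ d = 19) (h3 : ¬ d = 24)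
    (h4 : ¬ d = 28) (h5 : ¬ d = 31) : PySem.Dict.get? harmonicTable d = none := by
  have hitems : harmonicTable.items =
      [((12 : Int), ((12 : Int), (0 : Int))), (19, (7, 1)), (24, (5, 2)), (28, (4, 4)), (31, (3, 6))] := rfl
  simp [PySem.Dict.get?, hitems, List.find?_eq_none]
  omega

-- the inner scan over the five constant intervals is a table lookup
theorem inner_eq_lookup (ms : List (Int × Int × Int)) (i d : Int) :
    harmonicIntervals.foldl
      (fun ms2 hi =>
        if d = hi.1 then ms2 ++ [(i, PySem.List.pyGetD hi.2 0 0, hi.1)] else ms2)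
      ms =
    (match PySem.Dict.get? harmonicTable d with
      | some fp => ms ++ [(i, fp.1, d)]
      | none => ms) := by
  by_cases h1 : d = 12
  · subst h1; rfl
  by_cases h2 : d = 19
  · subst h2; rfl
  by_cases h3 : d = 24
  · subst h3; rfl
  by_cases h4 : d = 28
  · subst h4; rfl
  by_cases h5 : d = 31
  · subst h5; rfl
  rw [table_none d h1 h2 h3 h4 h5]
  simp [harmonicIntervals, h1, h2, h3, h4, h5]

theorem table_prio (d : Int) (fp : Int × Int) (h : PySem.Dict.get? harmonicTable d = some fp) :
    fp.2 = PySem.Dict.getD fretPriority fp.1 99 := by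
  by_cases h1 : d = 12
  · subst h1
    rw [show PySem.Dict.get? harmonicTable 12 = some ((12 : Int), (0 : Int)) from rfl] at h
    simp only [Option.some.injEq] at h; subst h; rfl
  by_cases h2 : d = 19
  · subst h2
    rw [show PySem.Dict.get? harmonicTable 19 = some ((7 : Int), (1 : Int)) from rfl] at h
    simp only [Option.some.injEq] at h; subst h; rfl
  by_cases h3 : d = 24
  · subst h3
    rw [show PySem.Dict.get? harmonicTable 24 = some ((5 : Int), (2 : Int)) from rfl] at h
    simp only [Option.some.injEq] at h; subst h; rfl
  by_cases h4 : d = 28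
  · subst h4
    rw [show PySem.Dict.get? harmonicTable 28 = some ((4 : Int), (4 : Int)) from rfl] at h
    simp only [Option.some.injEq] at h; subst h; rfl
  by_cases h5 : d = 31
  · subst h5
    rw [show PySem.Dict.get? harmonicTable 31 = some ((3 : Int), (6 : Int)) from rfl] at h
    simp only [Option.some.injEq] at h; subst h; rfl
  rw [table_none d h1 h2 h3 h4 h5] at h
  simp at h

theorem loop_inv (midi_pitch : Int) (t : List Int) :
    ∀ (s : Int) (ms : List (Int × Int × Int)),
      bLoop midi_pitch t s (Option.map gCand (aMin ms)) =
        Option.map gCand (aMin (aLoop midi_pitch t s ms)) := by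
  induction t with
  | nil => intro s ms; simp [bLoop, aLoop, PySem.List.enumerate]
  | cons x t ih =>
    intro s ms
    simp only [bLoop, aLoop, PySem.List.enumerate_cons, List.foldl_cons]
    rcases hx : PySem.Dict.get? harmonicTable (midi_pitch - x) with _ | fp <;> dsimp only
    · exact ih (s + 1) ms
    · have hprio := table_prio _ _ hx
      have hstep : aMin (ms ++ [(s, fp.1, midi_pitch - x)]) =
          minStep beforeA (aMin ms) (s, fp.1, midi_pitch - x) := by
        simp [aMin, List.foldl_append]
      have hmain :
          (match Option.map gCand (aMin ms) with
            | none => some (fp.2, s, fp.1, midi_pitch - x)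
            | some b =>
              if fp.2 < b.1 ∨ (fp.2 = b.1 ∧ s < b.2.1) then
                some (fp.2, s, fp.1, midi_pitch - x)
              else some b) =
          Option.map gCand (minStep beforeA (aMin ms) (s, fp.1, midi_pitch - x)) := by
        rcases aMin ms with _ | b
        · simp only [Option.map_none, minStep]
          simp [gCand, prioOf, hprio]
        · simp only [Option.map_some, minStep]
          have hcond : (fp.2 < (gCand b).1 ∨ (fp.2 = (gCand b).1 ∧ s < (gCand b).2.1)) ↔
              beforeA (s, fp.1, midi_pitch - x) b = true := by
            simp [gCand, beforeA, prioOf, hprio]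
            omega
          by_cases hc : beforeA (s, fp.1, midi_pitch - x) b = true
          · rw [if_pos (hcond.mpr hc), if_pos hc]
            simp [gCand, prioOf, hprio]
          · rw [if_neg (fun hh => hc (hcond.mp hh)), if_neg hc]
      rw [hmain, ← hstep]
      exact ih (s + 1) (ms ++ [(s, fp.1, midi_pitch - x)])

theorem a_eq_aMin (midi_pitch : Int) (tuning : List Int) :
    find_harmonic_match_py midi_pitch tuning = aMin (aLoop midi_pitch tuning 0 []) := by
  unfold find_harmonic_match_py
  have hmatch :
      (PySem.List.enumerate tuning).foldl
        (fun ms si =>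
          harmonicIntervals.foldl
            (fun ms2 hi =>
              if midi_pitch - si.2 = hi.1 then
                ms2 ++ [(si.1, PySem.List.pyGetD hi.2 0 0, hi.1)]
              else ms2)
            ms)
        [] = aLoop midi_pitch tuning 0 [] := by
    unfold aLoop
    apply PySem.List.foldl_congr_mem
    intro ms si _
    exact inner_eq_lookup ms si.1 (midi_pitch - si.2)
  rw [hmatch]
  by_cases hnil : aLoop midi_pitch tuning 0 [] = []
  · simp [hnil, aMin]
  · rw [if_neg hnil, head?_sorted2]

-- ===== VERDICT (by name: the statement is the Claim_ definition above) =====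
theorem find_harmonic_match_py_spec : Claim_equal_find_harmonic_match_py := by
  intro midi_pitch tuning _
  unfold Spec_find_harmonic_match_py
  rw [a_eq_aMin]
  have h := loop_inv midi_pitch tuning 0 []
  rw [show Option.map gCand (aMin ([] : List (Int × Int × Int))) = none from rfl] at h
  have halt : find_harmonic_match_py_alt midi_pitch tuning =
      (match bLoop midi_pitch tuning 0 none with
        | none => none
        | some b => some (b.2.1, b.2.2.1, b.2.2.2)) := rfl
  rw [halt, h]
  rcases aMin (aLoop midi_pitch tuning 0 []) with _ | c
  · rfl
  · rfl
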